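-- pv_equiv track=rewrite | github.com/nicolaskribas/bpfwavelet | check.py | calculate_s
-- ===== SOURCE A (Python) =====
-- def calculate_s(samples):
--     a = [samples]
--     for j in range(1, len(samples).bit_length()):
--         aj = []
--         for k in range(0, len(a[j - 1]) // 2):
--             aj.append(a[j - 1][2 * k] + a[j - 1][2 * k + 1])
--         a.append(aj)
--
--     s = []
--     for j in range(1, len(samples).bit_length()):
--         acc = 0
--         for k in range(0, len(a[j - 1]) // 2):
--             acc += (a[j - 1][2 * k] - a[j - 1][2 * k + 1]) ** 2
--         s.append(acc)
--     return s
-- ===== SOURCE B (Python) =====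
-- def calculate_s(samples):
--     n = len(samples)
--     P = [0]
--     for x in samples:
--         P.append(P[-1] + x)
--     s = []
--     b = 1
--     while 2 * b <= n:
--         s.append(sum((2 * P[2 * k * b + b] - P[2 * k * b] - P[2 * k * b + 2 * b]) ** 2
--                      for k in range(n // (2 * b))))
--         b *= 2
--     return s
-- ===== Notes on version B (the rewrite author's own statement) =====
-- stated objective: alternative
-- what changed: B replaces the pairwise-halving pyramid entirely by a single prefix-sum array: since every level-t element is a block sum of the original samples, each level's sum of squared pair-differences is computed in closed form as sum of (2*P[m+b]-P[m]-P[m+2b])^2 over block starts, never constructing any coarser level.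
import Mathlib
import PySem

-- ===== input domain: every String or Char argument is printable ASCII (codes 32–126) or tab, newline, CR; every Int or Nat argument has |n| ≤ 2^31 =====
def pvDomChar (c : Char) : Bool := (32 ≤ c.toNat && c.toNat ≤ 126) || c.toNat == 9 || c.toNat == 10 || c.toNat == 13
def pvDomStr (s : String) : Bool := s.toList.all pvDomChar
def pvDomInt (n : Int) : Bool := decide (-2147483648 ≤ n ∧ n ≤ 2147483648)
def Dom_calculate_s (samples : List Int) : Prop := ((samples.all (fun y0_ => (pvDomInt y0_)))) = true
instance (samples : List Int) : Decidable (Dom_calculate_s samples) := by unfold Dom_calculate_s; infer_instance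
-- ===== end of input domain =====

-- B replaces the pairwise-halving pyramid by a single prefix-sum array and computes
-- each level's sum of squared pair-differences in closed form from three prefix sums
-- per block (objective: alternative algorithm, same asymptotic cost).


-- ===== PORT A =====
-- int.bit_length of a nonnegative length
def pvBitLen (n : Nat) : Nat :=
  if n = 0 then 0 else pvBitLen (n / 2) + 1
decreasing_by omega

def calculate_s (samples : List Int) : List Int :=
  let a := (List.range' 1 (pvBitLen samples.length - 1)).foldl
    (fun a j =>
      let prev := a.getD (j - 1) []
      let aj := (List.range (prev.length / 2)).foldl
        (fun aj k => aj ++ [prev.getD (2 * k) 0 + prev.getD (2 * k + 1) 0]) []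
      a ++ [aj]) [samples]
  (List.range' 1 (pvBitLen samples.length - 1)).foldl
    (fun s j =>
      let prev := a.getD (j - 1) []
      let acc := (List.range (prev.length / 2)).foldl
        (fun acc k => acc + (prev.getD (2 * k) 0 - prev.getD (2 * k + 1) 0) ^ 2) 0
      s ++ [acc]) []

-- ===== PORT B =====
-- Source B's while-loop: b doubles each round; the 0 < b hypothesis is only for termination
def pvLoopB (P : List Int) (n b : Nat) (hb : 0 < b) : List Int :=
  if _h : 2 * b ≤ n then
    ((List.range (n / (2 * b))).map
      (fun k => (2 * P.getD (2 * k * b + b) 0 - P.getD (2 * k * b) 0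
                   - P.getD (2 * k * b + 2 * b) 0) ^ 2)).sum
    :: pvLoopB P n (2 * b) (by omega)
  else []
termination_by n - b
decreasing_by omega

def calculate_s_alt (samples : List Int) : List Int :=
  let n := samples.length
  let P := samples.foldl (fun P x => P ++ [P.getD (P.length - 1) 0 + x]) ([0] : List Int)
  pvLoopB P n 1 (by omega)

-- ===== PRECONDITION & SPEC =====
def Spec_calculate_s (samples : List Int) (out : List Int) : Prop := out = calculate_s_alt samples
instance (samples : List Int) (out : List Int) : Decidable (Spec_calculate_s samples out) := by unfold Spec_calculate_s; infer_instance

-- ===== CLAIM (what is proved, stated in full; the proofs are below) =====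
def Claim_equal_calculate_s : Prop := ∀ (samples : List Int), Dom_calculate_s samples → Spec_calculate_s samples (calculate_s samples)

-- ===== LEMMAS AND PROOFS =====

-- proof-side abbreviations: one Haar level, its squared-difference sum, prefix sums
def pvNext (xs : List Int) : List Int :=
  (List.range (xs.length / 2)).map (fun k => xs.getD (2 * k) 0 + xs.getD (2 * k + 1) 0)

def pvSq (xs : List Int) : Int :=
  ((List.range (xs.length / 2)).map
    (fun k => (xs.getD (2 * k) 0 - xs.getD (2 * k + 1) 0) ^ 2)).sum

def pvT (samples : List Int) (m : Nat) : Int := (samples.take m).sum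

theorem pv_foldl_app {α : Type} (f : Nat → α) (r : List Nat) (init : List α) :
    r.foldl (fun l k => l ++ [f k]) init = init ++ r.map f := by
  induction r generalizing init with
  | nil => simp
  | cons x xs ih => simp [List.foldl, ih]

theorem pv_foldl_add (f : Nat → Int) (r : List Nat) (init : Int) :
    r.foldl (fun acc k => acc + f k) init = init + (r.map f).sum := by
  induction r generalizing init with
  | nil => simp
  | cons x xs ih => simp [List.foldl, ih]; ring

theorem pv_getD_map_range {α : Type} (f : Nat → α) (n i : Nat) (d : α) (h : i < n) :
    ((List.range n).map f).getD i d = f i := by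
  simp [List.getD_eq_getElem?_getD, h]

theorem pv_bitLen_succ (n : Nat) (h : n ≠ 0) : pvBitLen n = pvBitLen (n / 2) + 1 := by
  rw [pvBitLen]; simp [h]

-- 2^t ≤ n ↔ t + 1 ≤ bit_length n
theorem pv_pow_le_iff (t : Nat) : ∀ n : Nat, 2 ^ t ≤ n ↔ t + 1 ≤ pvBitLen n := by
  induction t with
  | zero =>
    intro n
    by_cases h : n = 0
    · subst h; rw [pvBitLen]; simp
    · rw [pv_bitLen_succ n h]; constructor <;> intro <;> omega
  | succ t ih =>
    intro n
    by_cases h : n = 0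
    · subst h
      have h1 : pvBitLen 0 = 0 := by simp [pvBitLen]
      have h2 := Nat.two_pow_pos (t + 1)
      rw [h1]
      constructor <;> intro <;> omega
    · rw [pv_bitLen_succ n h]
      have h2 : 2 ^ (t + 1) ≤ n ↔ 2 ^ t ≤ n / 2 := by
        rw [Nat.le_div_iff_mul_le (by omega), pow_succ]
      rw [h2, ih (n / 2)]
      omega

-- the pyramid built by A's first loop is the list of iterated levels
theorem pv_buildA (samples : List Int) (m : Nat) :
    (List.range' 1 m).foldl
      (fun a j =>
        let prev := a.getD (j - 1) []
        let aj := (List.range (prev.length / 2)).foldl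
          (fun aj k => aj ++ [prev.getD (2 * k) 0 + prev.getD (2 * k + 1) 0]) []
        a ++ [aj]) [samples]
    = (List.range (m + 1)).map (fun i => pvNext^[i] samples) := by
  induction m with
  | zero => simp
  | succ m ih =>
    rw [List.range'_concat, List.foldl_append, ih]
    simp only [List.foldl]
    rw [pv_foldl_app]
    have hget : ((List.range (m + 1)).map (fun i => pvNext^[i] samples)).getD (1 + 1 * m - 1) []
        = pvNext^[m] samples := by
      have : 1 + 1 * m - 1 = m := by omega
      rw [this, pv_getD_map_range _ _ _ _ (by omega)]
    rw [hget]
    rw [show (List.range (m + 1 + 1)) = List.range (m + 1) ++ [m + 1] from List.range_succ]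
    simp [Function.iterate_succ_apply', pvNext]

-- A's second loop over the stored pyramid
theorem pv_sumA (samples : List Int) (M : Nat) (m : Nat) (hm : m ≤ M) :
    (List.range' 1 m).foldl
      (fun s j =>
        let prev := ((List.range (M + 1)).map (fun i => pvNext^[i] samples)).getD (j - 1) []
        let acc := (List.range (prev.length / 2)).foldl
          (fun acc k => acc + (prev.getD (2 * k) 0 - prev.getD (2 * k + 1) 0) ^ 2) 0
        s ++ [acc]) []
    = (List.range m).map (fun j => pvSq (pvNext^[j] samples)) := by
  induction m with
  | zero => simp
  | succ m ih =>
    rw [List.range'_concat, List.foldl_append, ih (by omega)]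
    simp only [List.foldl]
    have hget : ((List.range (M + 1)).map (fun i => pvNext^[i] samples)).getD (1 + 1 * m - 1) []
        = pvNext^[m] samples := by
      have : 1 + 1 * m - 1 = m := by omega
      rw [this, pv_getD_map_range _ _ _ _ (by omega)]
    rw [hget, pv_foldl_add]
    rw [show (List.range (m + 1)) = List.range m ++ [m] from List.range_succ]
    simp [pvSq]

-- level t is the list of block sums of width 2^t, written with prefix sums
theorem pv_level (samples : List Int) : ∀ t : Nat,
    pvNext^[t] samples
    = (List.range (samples.length / 2 ^ t)).map
        (fun i => pvT samples ((i + 1) * 2 ^ t) - pvT samples (i * 2 ^ t)) := by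
  intro t
  induction t with
  | zero =>
    apply List.ext_getElem
    · simp
    · intro i h1 h2
      have hi : i < samples.length := by simpa using h1
      have hs : (samples.take (i + 1)).sum = (samples.take i).sum + samples[i] := by
        rw [List.take_add_one, List.getElem?_eq_getElem hi]
        simp only [Option.toList_some, List.sum_append, List.sum_cons, List.sum_nil]
        ring
      simp only [Function.iterate_zero, id_eq, pow_zero, Nat.div_one, List.getElem_map,
        List.getElem_range, mul_one, pvT]
      omega
  | succ t ih =>
    rw [Function.iterate_succ_apply', ih, pvNext]
    have hlen : ((List.range (samples.length / 2 ^ t)).map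
        (fun i => pvT samples ((i + 1) * 2 ^ t) - pvT samples (i * 2 ^ t))).length
        = samples.length / 2 ^ t := by simp
    rw [hlen]
    have hdiv : samples.length / 2 ^ t / 2 = samples.length / 2 ^ (t + 1) := by
      rw [Nat.div_div_eq_div_mul, pow_succ]
    rw [hdiv]
    apply List.map_congr_left
    intro k hk
    have hk' : k < samples.length / 2 ^ (t + 1) := List.mem_range.mp hk
    have h2k : 2 * k < samples.length / 2 ^ t := by
      rw [← hdiv] at hk'; omega
    have h2k1 : 2 * k + 1 < samples.length / 2 ^ t := by
      rw [← hdiv] at hk'; omega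
    rw [pv_getD_map_range _ _ _ _ h2k, pv_getD_map_range _ _ _ _ h2k1]
    have e1 : (2 * k + 1) * 2 ^ t = k * 2 ^ (t + 1) + 2 ^ t := by ring
    have e2 : 2 * k * 2 ^ t = k * 2 ^ (t + 1) := by ring
    have e3 : (2 * k + 1 + 1) * 2 ^ t = (k + 1) * 2 ^ (t + 1) := by ring
    rw [e1, e2, e3]
    ring

-- the squared-difference sum of level t in prefix-sum closed form
theorem pv_sq_level (samples : List Int) (t : Nat) :
    pvSq (pvNext^[t] samples)
    = ((List.range (samples.length / 2 ^ (t + 1))).map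
        (fun k => (2 * pvT samples (k * 2 ^ (t + 1) + 2 ^ t)
                    - pvT samples (k * 2 ^ (t + 1))
                    - pvT samples ((k + 1) * 2 ^ (t + 1))) ^ 2)).sum := by
  rw [pv_level samples t, pvSq]
  have hdiv : samples.length / 2 ^ t / 2 = samples.length / 2 ^ (t + 1) := by
    rw [Nat.div_div_eq_div_mul, pow_succ]
  simp only [List.length_map, List.length_range, hdiv]
  congr 1
  apply List.map_congr_left
  intro k hk
  have hk' : k < samples.length / 2 ^ (t + 1) := List.mem_range.mp hk
  have h2k : 2 * k < samples.length / 2 ^ t := by rw [← hdiv] at hk'; omega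
  have h2k1 : 2 * k + 1 < samples.length / 2 ^ t := by rw [← hdiv] at hk'; omega
  rw [pv_getD_map_range _ _ _ _ h2k, pv_getD_map_range _ _ _ _ h2k1]
  have e1 : (2 * k + 1) * 2 ^ t = k * 2 ^ (t + 1) + 2 ^ t := by ring
  have e2 : 2 * k * 2 ^ t = k * 2 ^ (t + 1) := by ring
  have e3 : (2 * k + 1 + 1) * 2 ^ t = (k + 1) * 2 ^ (t + 1) := by ring
  rw [e1, e2, e3]
  ring

-- the prefix-sum fold of Source B
theorem pv_prefix_fold : ∀ (l P0 : List Int), P0 ≠ [] →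
    l.foldl (fun P x => P ++ [P.getD (P.length - 1) 0 + x]) P0
    = P0 ++ (List.range l.length).map
        (fun i => P0.getD (P0.length - 1) 0 + (l.take (i + 1)).sum) := by
  intro l
  induction l with
  | nil => simp
  | cons x xs ih =>
    intro P0 hP0
    simp only [List.foldl]
    rw [ih (P0 ++ [P0.getD (P0.length - 1) 0 + x]) (by simp)]
    have hlast : (P0 ++ [P0.getD (P0.length - 1) 0 + x]).getD
        ((P0 ++ [P0.getD (P0.length - 1) 0 + x]).length - 1) 0
        = P0.getD (P0.length - 1) 0 + x := by
      simp [List.getD_eq_getElem?_getD]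
    rw [hlast]
    rw [show List.range (x :: xs).length = 0 :: (List.range xs.length).map Nat.succ by
      simp [List.range_succ_eq_map]]
    simp only [List.map_cons, List.map_map, List.append_assoc, List.singleton_append]
    congr 2
    · simp
    · apply List.map_congr_left
      intro i _
      simp [Function.comp, List.take_succ_cons]
      ring

-- P's entries are the prefix sums of samples
theorem pv_P_getD (samples : List Int) (m : Nat) (hm : m ≤ samples.length) :
    (samples.foldl (fun P x => P ++ [P.getD (P.length - 1) 0 + x]) ([0] : List Int)).getD m 0
    = pvT samples m := by
  rw [pv_prefix_fold samples [0] (by simp)]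
  match m with
  | 0 => simp [pvT]
  | Nat.succ i =>
    have hi : i < samples.length := by omega
    have : ([ (0 : Int) ] ++ (List.range samples.length).map
        (fun i => ([ (0 : Int) ].getD 0 0) + (samples.take (i + 1)).sum)).getD (i + 1) 0
        = (samples.take (i + 1)).sum := by
      rw [List.getD_eq_getElem?_getD, List.getElem?_append_right (by simp)]
      simp [hi]
    simpa [pvT] using this

-- Source B's loop at b = 2^t emits exactly the levels t, t+1, … in order
theorem pv_loopB (samples : List Int) :
    ∀ (m t b : Nat) (hb : 0 < b), b = 2 ^ t → m = pvBitLen samples.length - 1 - t →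
    pvLoopB (samples.foldl (fun P x => P ++ [P.getD (P.length - 1) 0 + x]) ([0] : List Int))
      samples.length b hb
    = (List.range' t m).map (fun j => pvSq (pvNext^[j] samples)) := by
  intro m
  induction m with
  | zero =>
    intro t b hb hbt hm
    rw [pvLoopB]
    have hcond : ¬ (2 * b ≤ samples.length) := by
      intro hc
      have : 2 ^ (t + 1) ≤ samples.length := by
        rw [pow_succ]; omega
      have := (pv_pow_le_iff (t + 1) samples.length).mp this
      omega
    simp [hcond]
  | succ m ih =>
    intro t b hb hbt hm
    rw [pvLoopB]
    have hcond : 2 * b ≤ samples.length := by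
      have : t + 2 ≤ pvBitLen samples.length := by omega
      have := (pv_pow_le_iff (t + 1) samples.length).mpr this
      rw [pow_succ] at this; omega
    simp only [hcond, dite_true]
    rw [ih (t + 1) (2 * b) (by omega) (by rw [hbt, pow_succ]; ring) (by omega)]
    rw [List.range'_succ]
    simp only [List.map_cons]
    congr 1
    -- head: the closed-form level sum equals pvSq of level t
    rw [pv_sq_level samples t]
    have hdiv2 : samples.length / (2 * b) = samples.length / 2 ^ (t + 1) := by
      rw [hbt, pow_succ]; ring_nf
    rw [hdiv2]
    apply congrArg
    apply List.map_congr_left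
    intro k hk
    have hk' : k < samples.length / 2 ^ (t + 1) := List.mem_range.mp hk
    have hkb : (k + 1) * 2 ^ (t + 1) ≤ samples.length := by
      have := (Nat.le_div_iff_mul_le (Nat.two_pow_pos (t+1))).mp (by omega : k + 1 ≤ samples.length / 2 ^ (t + 1))
      exact this
    have e1 : 2 * k * b + b = k * 2 ^ (t + 1) + 2 ^ t := by rw [hbt]; ring
    have e2 : 2 * k * b = k * 2 ^ (t + 1) := by rw [hbt]; ring
    have e3 : 2 * k * b + 2 * b = (k + 1) * 2 ^ (t + 1) := by rw [hbt]; ring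
    rw [e3, e1, e2]
    rw [pv_P_getD samples _ (by nlinarith [Nat.two_pow_pos t, pow_succ 2 t]),
        pv_P_getD samples _ (by nlinarith),
        pv_P_getD samples _ hkb]

-- ===== VERDICT (by name: the statement is the Claim_ definition above) =====
theorem calculate_s_spec : Claim_equal_calculate_s := by
  intro samples _
  unfold Spec_calculate_s calculate_s calculate_s_alt
  rw [pv_buildA samples (pvBitLen samples.length - 1)]
  rw [pv_sumA samples (pvBitLen samples.length - 1) (pvBitLen samples.length - 1) le_rfl]
  rw [pv_loopB samples (pvBitLen samples.length - 1) 0 1 (by omega) (by norm_num) (by omega)]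
  simp [List.range_eq_range']
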